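-- pv_equiv track=rewrite | github.com/justinbarak/2020_Advent_of_Code | Day22B.py | read_card_input
-- ===== SOURCE A (Python) =====
-- def read_card_input(deck_input: list) -> list:
--     p1 = []
--     p2 = []
--     i = 0
--     active_p = 1
--     while i < len(deck_input):
--         try:
--             if active_p == 1:
--                 p1.append(int(deck_input[i]))
--             elif active_p == 2:
--                 p2.append(int(deck_input[i]))
--             else:
--                 raise NotImplementedError("Only 2 Players were anticipated...")
--         except:
--             if deck_input[i] == '':
--                 active_p += 1
--         i += 1
--     return p1, p2
-- ===== SOURCE B (Python) =====
-- def read_card_input(deck_input: list) -> list: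
--     # Partition input into segments separated by blank lines, then parse
--     # the first two segments; all later segments are ignored.
--     segs = []
--     cur = []
--     for line in deck_input:
--         if line == '':
--             segs.append(cur)
--             cur = []
--         else:
--             cur.append(line)
--     segs.append(cur)
--
--     def parse(seg):
--         out = []
--         for line in seg:
--             try:
--                 out.append(int(line))
--             except ValueError:
--                 pass
--         return out
--
--     p1 = parse(segs[0])
--     p2 = parse(segs[1]) if len(segs) > 1 else []
--     return p1, p2
-- ===== Notes on version B (the rewrite author's own statement) =====
-- stated objective: simpler
-- what changed: Replaces the index/active-player state machine (with its exception-driven player switching) by a two-phase decomposition: first split the lines into blank-separated segments, then parse the first two segments into decks, ignoring the rest.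
import Mathlib
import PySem

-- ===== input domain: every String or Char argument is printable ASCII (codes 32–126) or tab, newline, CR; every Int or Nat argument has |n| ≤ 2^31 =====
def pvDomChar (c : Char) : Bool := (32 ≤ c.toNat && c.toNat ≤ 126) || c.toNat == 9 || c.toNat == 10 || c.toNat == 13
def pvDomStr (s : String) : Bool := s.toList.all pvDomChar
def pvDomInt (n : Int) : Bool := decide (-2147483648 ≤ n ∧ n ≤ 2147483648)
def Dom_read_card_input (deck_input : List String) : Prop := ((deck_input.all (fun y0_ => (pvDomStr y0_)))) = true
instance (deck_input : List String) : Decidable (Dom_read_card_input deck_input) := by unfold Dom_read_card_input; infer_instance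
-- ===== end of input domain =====

-- B replaces A's index/active-player state machine by blank-line segmentation
-- followed by per-segment parsing: a simpler two-phase decomposition, same cost.

-- ===== PORT A =====
-- A's while loop over i with state (active_p, p1, p2); int(...) → PySem.Int.ofStr?
-- (none = ValueError, caught by the bare except, as is the NotImplementedError
-- raised in the active_p ≥ 3 branch before anything is appended).
def readGoA : List String → Int → List Int → List Int → List Int × List Int
  | [], _, p1, p2 => (p1, p2)
  | l :: rest, ap, p1, p2 =>
    match PySem.Int.ofStr? l with
    | some v =>
      if ap == 1 then readGoA rest ap (p1 ++ [v]) p2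
      else if ap == 2 then readGoA rest ap p1 (p2 ++ [v])
      else -- raise NotImplementedError, caught by except
        readGoA rest (if l == "" then ap + 1 else ap) p1 p2
    | none => readGoA rest (if l == "" then ap + 1 else ap) p1 p2

def read_card_input (deck_input : List String) : List Int × List Int :=
  readGoA deck_input 1 [] []

-- ===== PORT B =====
-- segments separated by '' lines (Source B's loop over `line` with segs/cur)
def segsOf : List String → List String → List (List String)
  | [], cur => [cur]
  | l :: rest, cur => if l == "" then cur :: segsOf rest [] else segsOf rest (cur ++ [l])

-- Source B's `parse`: append int(line) when it parses, skip otherwise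
def parseGo : List String → List Int → List Int
  | [], out => out
  | l :: rest, out =>
    match PySem.Int.ofStr? l with
    | some v => parseGo rest (out ++ [v])
    | none => parseGo rest out

def read_card_input_alt (deck_input : List String) : List Int × List Int :=
  let segs := segsOf deck_input []
  (parseGo (segs.headD []) [],
   if 1 < segs.length then parseGo (segs[1]?.getD []) [] else [])

-- ===== PRECONDITION & SPEC =====
def Spec_read_card_input (deck_input : List String) (out : List Int × List Int) : Prop := out = read_card_input_alt deck_input
instance (deck_input : List String) (out : List Int × List Int) : Decidable (Spec_read_card_input deck_input out) := by unfold Spec_read_card_input; infer_instance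

-- ===== CLAIM (what is proved, stated in full; the proofs are below) =====
def Claim_equal_read_card_input : Prop := ∀ (deck_input : List String), Dom_read_card_input deck_input → Spec_read_card_input deck_input (read_card_input deck_input)

-- ===== LEMMAS AND PROOFS =====

theorem ofStr?_empty : PySem.Int.ofStr? "" = none := by decide

theorem parseGo_acc (seg : List String) (out : List Int) :
    parseGo seg out = out ++ parseGo seg [] := by
  induction seg generalizing out with
  | nil => simp [parseGo]
  | cons l rest ih =>
    cases h : PySem.Int.ofStr? l with
    | some v =>
      simp only [parseGo, h, List.nil_append]
      rw [ih ([v]), ih (out ++ [v])]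
      simp
    | none => simp only [parseGo, h]; exact ih out

theorem segsOf_ne_nil (xs : List String) (cur : List String) : segsOf xs cur ≠ [] := by
  induction xs generalizing cur with
  | nil => simp [segsOf]
  | cons l rest ih => simp only [segsOf]; split <;> simp [ih]

theorem segsOf_cons_arb (xs : List String) (cur : List String) :
    segsOf xs cur = (cur ++ (segsOf xs []).headD []) :: (segsOf xs []).tail := by
  induction xs generalizing cur with
  | nil => simp [segsOf]
  | cons l rest ih =>
    by_cases hl : l = ""
    · simp [segsOf, hl]
    · have hbe : (l == "") = false := by simpa using hl
      simp only [segsOf, hbe, Bool.false_eq_true, if_false, List.nil_append]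
      rw [ih (cur ++ [l]), ih ([l])]
      simp

-- after two blank lines A ignores everything
theorem readGoA_ge3 (xs : List String) (ap : Int) (p1 p2 : List Int) (h : 3 ≤ ap) :
    readGoA xs ap p1 p2 = (p1, p2) := by
  induction xs generalizing ap with
  | nil => simp [readGoA]
  | cons l rest ih =>
    have h1 : (ap == 1) = false := by simp; omega
    have h2 : (ap == 2) = false := by simp; omega
    cases hp : PySem.Int.ofStr? l with
    | some v =>
      simp only [readGoA, hp, h1, h2, Bool.false_eq_true, if_false]
      split <;> [exact ih _ (by omega); exact ih _ h]
    | none =>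
      simp only [readGoA, hp]
      split <;> [exact ih _ (by omega); exact ih _ h]

-- while player 2 is active, A appends the parses of the current segment to p2
theorem readGoA_2 (xs : List String) (p1 p2 : List Int) :
    readGoA xs 2 p1 p2 = (p1, p2 ++ parseGo ((segsOf xs []).headD []) []) := by
  induction xs generalizing p2 with
  | nil => simp [readGoA, segsOf, parseGo]
  | cons l rest ih =>
    by_cases hl : l = ""
    · subst hl
      have he : ("" == "") = true := rfl
      simp only [readGoA, ofStr?_empty, segsOf, he, if_true]
      rw [show (2:Int)+1 = 3 by norm_num, readGoA_ge3 rest 3 p1 p2 (by omega)]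
      simp [parseGo]
    · have hbe : (l == "") = false := by simpa using hl
      cases hp : PySem.Int.ofStr? l with
      | some v =>
        simp only [readGoA, hp]
        norm_num
        rw [ih (p2 ++ [v])]
        simp only [segsOf, hbe, Bool.false_eq_true, if_false, List.nil_append,
          segsOf_cons_arb rest [l]]
        simp [parseGo, hp, parseGo_acc _ [v]]
      | none =>
        simp only [readGoA, hp, hbe, Bool.false_eq_true, if_false]
        rw [ih p2]
        simp only [segsOf, hbe, Bool.false_eq_true, if_false, List.nil_append,
          segsOf_cons_arb rest [l]]
        simp [parseGo, hp]

theorem readGoA_1 (xs : List String) (p1 p2 : List Int) :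
    readGoA xs 1 p1 p2 =
      (p1 ++ parseGo ((segsOf xs []).headD []) [],
       p2 ++ (if 1 < (segsOf xs []).length then parseGo ((segsOf xs [])[1]?.getD []) [] else [])) := by
  induction xs generalizing p1 with
  | nil => simp [readGoA, segsOf, parseGo]
  | cons l rest ih =>
    by_cases hl : l = ""
    · subst hl
      have he : ("" == "") = true := rfl
      simp only [readGoA, ofStr?_empty, segsOf, he, if_true]
      rw [show (1:Int)+1 = 2 by norm_num, readGoA_2 rest p1 p2]
      rcases hs : segsOf rest [] with _ | ⟨h0, t⟩
      · exact absurd hs (segsOf_ne_nil rest [])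
      · simp [parseGo]
    · have hbe : (l == "") = false := by simpa using hl
      cases hp : PySem.Int.ofStr? l with
      | some v =>
        simp only [readGoA, hp]
        norm_num
        rw [ih (p1 ++ [v])]
        simp only [segsOf, hbe, Bool.false_eq_true, if_false, List.nil_append,
          segsOf_cons_arb rest [l]]
        rcases hs : segsOf rest [] with _ | ⟨h0, t⟩
        · exact absurd hs (segsOf_ne_nil rest [])
        · simp [parseGo, hp, parseGo_acc _ [v]]
      | none =>
        simp only [readGoA, hp, hbe, Bool.false_eq_true, if_false]
        rw [ih p1]
        simp only [segsOf, hbe, Bool.false_eq_true, if_false, List.nil_append,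
          segsOf_cons_arb rest [l]]
        rcases hs : segsOf rest [] with _ | ⟨h0, t⟩
        · exact absurd hs (segsOf_ne_nil rest [])
        · simp [parseGo, hp]

-- ===== VERDICT (by name: the statement is the Claim_ definition above) =====
theorem read_card_input_spec : Claim_equal_read_card_input := by
  intro xs _
  unfold Spec_read_card_input read_card_input read_card_input_alt
  rw [readGoA_1 xs [] []]
  simp
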